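-- pv_equiv track=rewrite | github.com/OranPie/Ferrython | stdlib/Lib/calendar.py | monthcalendar
-- ===== SOURCE A (Python) =====
-- _mdays = [0, 31, 28, 31, 30, 31, 30, 31, 31, 30, 31, 30, 31]
--
-- def isleap(year):
--     """Return True for leap years, False for non-leap years."""
--     return year % 4 == 0 and (year % 100 != 0 or year % 400 == 0)
--
-- def weekday(year, month, day):
--     """Return day of the week (0=Monday, 6=Sunday) for year, month, day.
--     Uses Zeller-like formula."""
--     if month < 3:
--         month = month + 12
--         year = year - 1
--     q = day
--     m = month
--     k = year % 100
--     j = year // 100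
--     # Zeller's congruence adapted for Monday=0
--     h = (q + (13 * (m + 1)) // 5 + k + k // 4 + j // 4 - 2 * j) % 7
--     # Convert from Zeller (0=Saturday) to Python (0=Monday)
--     return (h + 6) % 7
--
-- def monthrange(year, month):
--     """Return weekday of first day of month and number of days in month."""
--     if not 1 <= month <= 12:
--         raise ValueError("bad month number; must be 1-12")
--     day1 = weekday(year, month, 1)
--     if month == 2 and isleap(year):
--         ndays = 29
--     else:
--         ndays = _mdays[month]
--     return (day1, ndays)
--
-- def monthcalendar(year, month):
--     """Return a matrix representing a month's calendar.
--     Each row represents a week; days outside the month are set to 0."""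
--     day1, ndays = monthrange(year, month)
--     rows = []
--     row = [0] * day1
--     day = 1
--     while day <= ndays:
--         row.append(day)
--         if len(row) == 7:
--             rows.append(row)
--             row = []
--         day = day + 1
--     if row:
--         while len(row) < 7:
--             row.append(0)
--         rows.append(row)
--     return rows
-- ===== SOURCE B (Python) =====
-- _mdays = [0, 31, 28, 31, 30, 31, 30, 31, 31, 30, 31, 30, 31]
--
-- def isleap(year):
--     """Return True for leap years, False for non-leap years."""
--     return year % 4 == 0 and (year % 100 != 0 or year % 400 == 0)
--
-- def weekday(year, month, day):
--     if month < 3: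
--         month = month + 12
--         year = year - 1
--     q = day
--     m = month
--     k = year % 100
--     j = year // 100
--     h = (q + (13 * (m + 1)) // 5 + k + k // 4 + j // 4 - 2 * j) % 7
--     return (h + 6) % 7
--
-- def monthrange(year, month):
--     if not 1 <= month <= 12:
--         raise ValueError("bad month number; must be 1-12")
--     day1 = weekday(year, month, 1)
--     if month == 2 and isleap(year):
--         ndays = 29
--     else:
--         ndays = _mdays[month]
--     return (day1, ndays)
--
-- def monthcalendar(year, month):
--     """Return a matrix representing a month's calendar.
--     Each row represents a week; days outside the month are set to 0."""
--     day1, ndays = monthrange(year, month)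
--     # flat cell sequence, padded to a whole number of weeks
--     cells = [0] * day1 + list(range(1, ndays + 1))
--     cells = cells + [0] * (-len(cells) % 7)
--     # reshape into weeks
--     return [cells[i:i + 7] for i in range(0, len(cells), 7)]
-- ===== Notes on version B (the rewrite author's own statement) =====
-- stated objective: alternative
-- what changed: Replaces A's running row buffer with its length-7 flush and trailing pad loop by a flat-build-then-chunk decomposition: build the flat cell list [0]*day1 + 1..ndays, pad it to a multiple of 7, then reshape by slicing into weeks.
import Mathlib
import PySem

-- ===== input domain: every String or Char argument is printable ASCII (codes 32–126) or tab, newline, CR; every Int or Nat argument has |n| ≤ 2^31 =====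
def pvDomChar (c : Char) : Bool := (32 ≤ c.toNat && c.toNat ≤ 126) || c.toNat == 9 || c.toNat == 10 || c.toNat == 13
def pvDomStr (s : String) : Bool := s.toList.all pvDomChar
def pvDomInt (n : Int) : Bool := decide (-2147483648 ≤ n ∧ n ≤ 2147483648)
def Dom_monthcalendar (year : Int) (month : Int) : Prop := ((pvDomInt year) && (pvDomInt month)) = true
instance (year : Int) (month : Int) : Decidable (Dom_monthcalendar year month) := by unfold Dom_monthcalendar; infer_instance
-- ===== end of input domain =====

-- B replaces A's running row buffer (flush at length 7, trailing pad loop) by a flat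
-- build-then-chunk decomposition: flat cell list, pad to a multiple of 7, slice into weeks.


-- ===== PORT A =====
-- shared same-module helpers (identical source in Source A and Source B)
def pyMdays : List Int := [0, 31, 28, 31, 30, 31, 30, 31, 31, 30, 31, 30, 31]

def pyIsleap (year : Int) : Bool :=
  PySem.Int.mod year 4 == 0 && (PySem.Int.mod year 100 != 0 || PySem.Int.mod year 400 == 0)

def pyWeekday (year : Int) (month : Int) (day : Int) : Int :=
  let p := if month < 3 then (year - 1, month + 12) else (year, month)
  let q := day
  let m := p.2
  let k := PySem.Int.mod p.1 100
  let j := PySem.Int.floordiv p.1 100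
  let h := PySem.Int.mod (q + PySem.Int.floordiv (13 * (m + 1)) 5 + k + PySem.Int.floordiv k 4 + PySem.Int.floordiv j 4 - 2 * j) 7
  PySem.Int.mod (h + 6) 7

-- 'raise ValueError' is modelled as none; Pre_ excludes that branch
def pyMonthrange (year : Int) (month : Int) : Option (Int × Int) :=
  if 1 ≤ month ∧ month ≤ 12 then
    some (pyWeekday year month 1,
          if month == 2 && pyIsleap year then 29 else (PySem.List.pyGet? pyMdays month).getD 0)
  else none

-- the trailing 'while len(row) < 7: row.append(0)' loop (fuel 7 suffices: len(row) ≥ 1 there)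
def aPad : Nat → List Int → List Int
  | 0, row => row
  | n + 1, row => if row.length < 7 then aPad n (row ++ [0]) else row

-- the 'while day <= ndays' loop of A, fuel = remaining days
def aLoop : Nat → Int → List (List Int) → List Int → List (List Int)
  | 0, _, rows, row => if row ≠ [] then rows ++ [aPad 7 row] else rows
  | n + 1, day, rows, row =>
      let row' := row ++ [day]
      if row'.length == 7 then aLoop n (day + 1) (rows ++ [row']) []
      else aLoop n (day + 1) rows row'

def monthcalendar (year : Int) (month : Int) : List (List Int) :=
  match pyMonthrange year month with
  | none => []
  | some (day1, ndays) => aLoop ndays.toNat 1 [] (List.replicate day1.toNat 0)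

-- ===== PORT B =====
def monthcalendar_alt (year : Int) (month : Int) : List (List Int) :=
  match pyMonthrange year month with
  | none => []
  | some (day1, ndays) =>
      let cells := List.replicate day1.toNat 0 ++ PySem.List.pyRange 1 (ndays + 1) 1
      let cells2 := cells ++ List.replicate (PySem.Int.mod (-(cells.length : Int)) 7).toNat 0
      (PySem.List.pyRange 0 (cells2.length : Int) 7).map
        (fun i => PySem.List.slice cells2 (some i) (some (i + 7)))

-- ===== PRECONDITION & SPEC =====
-- A raises ValueError for month outside 1..12; exactly those inputs are excluded
def Pre_monthcalendar (year : Int) (month : Int) : Prop := 1 ≤ month ∧ month ≤ 12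
instance (year : Int) (month : Int) : Decidable (Pre_monthcalendar year month) := by unfold Pre_monthcalendar; infer_instance
def pvWitness_monthcalendar : Int × Int := (2024, 2)

def Spec_monthcalendar (year : Int) (month : Int) (out : List (List Int)) : Prop := out = monthcalendar_alt year month
instance (year : Int) (month : Int) (out : List (List Int)) : Decidable (Spec_monthcalendar year month out) := by unfold Spec_monthcalendar; infer_instance

-- ===== CLAIM (what is proved, stated in full; the proofs are below) =====
def Claim_equal_monthcalendar : Prop := ∀ (year : Int) (month : Int), Dom_monthcalendar year month → Pre_monthcalendar year month → Spec_monthcalendar year month (monthcalendar year month)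

-- ===== LEMMAS AND PROOFS =====

-- the first day index is always in [0, 7)
theorem pyWeekday_bounds (year month day : Int) :
    0 ≤ pyWeekday year month day ∧ pyWeekday year month day < 7 := by
  unfold pyWeekday PySem.Int.mod
  exact ⟨Int.fmod_nonneg_of_pos _ (by norm_num), Int.fmod_lt_of_pos _ (by norm_num)⟩

-- the month length is one of 28, 29, 30, 31
theorem ndays_cases (year month : Int) (h1 : 1 ≤ month) (h2 : month ≤ 12) :
    (if month == 2 && pyIsleap year then 29 else (PySem.List.pyGet? pyMdays month).getD 0)
      = 28 ∨
    (if month == 2 && pyIsleap year then 29 else (PySem.List.pyGet? pyMdays month).getD 0)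
      = 29 ∨
    (if month == 2 && pyIsleap year then 29 else (PySem.List.pyGet? pyMdays month).getD 0)
      = 30 ∨
    (if month == 2 && pyIsleap year then 29 else (PySem.List.pyGet? pyMdays month).getD 0)
      = 31 := by
  interval_cases month <;>
    simp [pyMdays, PySem.List.pyGet?, PySem.List.pyIdx?] <;>
    rcases pyIsleap year <;> simp

-- on every reachable (day1, ndays) pair A's loop equals B's build-then-chunk
theorem key (d n : Int) (hd0 : 0 ≤ d) (hd7 : d < 7)
    (hn : n = 28 ∨ n = 29 ∨ n = 30 ∨ n = 31) :
    aLoop n.toNat 1 [] (List.replicate d.toNat 0) =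
      (let cells := List.replicate d.toNat 0 ++ PySem.List.pyRange 1 (n + 1) 1
       let cells2 := cells ++ List.replicate (PySem.Int.mod (-(cells.length : Int)) 7).toNat 0
       (PySem.List.pyRange 0 (cells2.length : Int) 7).map
         (fun i => PySem.List.slice cells2 (some i) (some (i + 7)))) := by
  interval_cases d <;> rcases hn with hn | hn | hn | hn <;> subst hn <;> decide

-- ===== VERDICT (by name: the statement is the Claim_ definition above) =====
theorem monthcalendar_spec : Claim_equal_monthcalendar := by
  intro year month _ hpre
  unfold Spec_monthcalendar monthcalendar monthcalendar_alt pyMonthrange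
  have hp : 1 ≤ month ∧ month ≤ 12 := hpre
  rw [if_pos hp]
  exact key _ _ (pyWeekday_bounds year month 1).1 (pyWeekday_bounds year month 1).2
    (ndays_cases year month hpre.1 hpre.2)
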